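-- pv_equiv track=rewrite | github.com/Phurinatpha/Lab | LabPython/Lab06/Lab06_5_640510676.py | longest_digit_run
-- ===== SOURCE A (Python) =====
-- def longest_digit_run(n):
--     max_re = 1              #ค่าสูงสุดของตัวที่ติดกัน
--     re  = 1                 #ค่า จน ที่ติดกันไว้เทียบกับ max_re
--     n0 = n%10               #ตัวที่เอามาเทียบ
--     n = n//10               #ตัวเหลือ
--     count = n0              #เทียบว่าเดิม(re)กับค่าใหม่ == กันรึเปล่า
--     while (n != 0):         #ทำไปจนกว่าค่า n = 0
--         n0 = n%10           #ค่า n0 จากการ loop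
--         n = n//10           #ค่า n จาก loop
--         if (count == n0):   #รอบแรกจะดึงเอาค่า count มาเทียบกับค่า n0 ใน loop
--             re = re + 1     #ถ้าเท่ากันค่า re + 1
--         else:               #ถ้าไม่เข้า if ก็ให้ จน ที่ติดกัน = 1 แล้วให้ค่า count = n0 ที่ผ่านการตัดตัวล่าสุดออก(เปลี่ยน)
--             re = 1
--             count = n0
--         if (re > max_re):   #ถ้า re>max_re ให้ค่า max ใหม่ = re
--             max_re = re
--     return max_re
-- ===== SOURCE B (Python) =====
-- def longest_digit_run(n):
--     # Search candidate run lengths downward: the answer is the largest k such that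
--     # some digit repeated k times appears as a substring of str(n).
--     s = str(n)
--     k = len(s)
--     while not any(str(d) * k in s for d in range(10)):
--         k -= 1
--     return k
-- ===== Notes on version B (the rewrite author's own statement) =====
-- stated objective: alternative
-- what changed: B searches downward over candidate run lengths k (from len(str(n))), returning the first k for which some digit repeated k times occurs as a substring of str(n), instead of A's single-pass least-significant-digit scan with running counters; Pre_ excludes negative n, on which A's while loop never terminates.
import Mathlib
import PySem

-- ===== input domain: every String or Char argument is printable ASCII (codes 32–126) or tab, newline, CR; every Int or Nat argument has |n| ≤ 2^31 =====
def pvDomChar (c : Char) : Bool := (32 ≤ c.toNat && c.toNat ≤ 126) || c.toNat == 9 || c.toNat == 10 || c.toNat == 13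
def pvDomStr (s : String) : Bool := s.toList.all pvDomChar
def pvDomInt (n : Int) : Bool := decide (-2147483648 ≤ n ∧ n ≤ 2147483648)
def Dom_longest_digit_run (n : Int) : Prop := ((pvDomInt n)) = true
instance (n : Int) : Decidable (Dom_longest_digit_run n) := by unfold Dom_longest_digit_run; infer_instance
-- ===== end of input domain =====

-- B searches candidate run lengths downward, returning the first k for which some digit
-- repeated k times is a substring of str(n) — a different algorithm from A's running-counter
-- digit scan (alternative; not faster).


-- ===== PORT A =====
theorem pvLoop_dec (n : Int) (h0 : ¬ n = 0) (h1 : ¬ n < 0) :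
    (PySem.Int.floordiv n 10).toNat < n.toNat := by
  have h := PySem.Int.floordiv_eq_ediv_of_pos (a := n) (b := 10) (by norm_num)
  rw [h]; omega

def pvLoop (n count re max_re : Int) : Int :=
  if h0 : n = 0 then max_re
  else if h1 : n < 0 then max_re  -- totality guard: Python's while-loop never terminates for n < 0 (excluded by Pre_)
  else
    let n0 := PySem.Int.mod n 10
    let n1 := PySem.Int.floordiv n 10
    let re' := if count = n0 then re + 1 else 1
    let count' := if count = n0 then count else n0
    let mx' := if re' > max_re then re' else max_re
    pvLoop n1 count' re' mx'
termination_by n.toNat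
decreasing_by exact pvLoop_dec n h0 h1

def longest_digit_run (n : Int) : Int :=
  let n0 := PySem.Int.mod n 10
  let n1 := PySem.Int.floordiv n 10
  pvLoop n1 n0 1 1

-- ===== PORT B =====
-- Python's substring test 'pat in s' ported by hand: a prefix test at each suffix (exact).
def pvSub (pat : List Char) : List Char → Bool
  | [] => pat.isPrefixOf []
  | c :: t => pat.isPrefixOf (c :: t) || pvSub pat t

-- any(str(d) * k in s for d in range(10))
def pvBCond (s : List Char) (k : Nat) : Bool :=
  (PySem.List.pyRange 0 10 1).any (fun d => pvSub (List.replicate k (Nat.digitChar d.toNat)) s)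

-- while not any(...): k -= 1 ; return k.  At k = 0 the Python condition is always true
-- (the empty string is a substring), so returning 0 there is exact.
def pvBLoop (s : List Char) : Nat → Int
  | 0 => 0
  | k + 1 => if pvBCond s (k + 1) then ((k + 1 : Nat) : Int) else pvBLoop s k

def longest_digit_run_alt (n : Int) : Int :=
  let s := PySem.Int.toChars n
  pvBLoop s s.length

-- ===== PRECONDITION & SPEC =====
-- Pre_ excludes negative n: there A's while-loop never terminates (the floor division gets stuck at minus one), so A returns no value.
def Pre_longest_digit_run (n : Int) : Prop := 0 ≤ n
instance (n : Int) : Decidable (Pre_longest_digit_run n) := by unfold Pre_longest_digit_run; infer_instance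
def pvWitness_longest_digit_run : Int := (1223)

def Spec_longest_digit_run (n : Int) (out : Int) : Prop := out = longest_digit_run_alt n
instance (n : Int) (out : Int) : Decidable (Spec_longest_digit_run n out) := by unfold Spec_longest_digit_run; infer_instance

-- ===== CLAIM (what is proved, stated in full; the proofs are below) =====
def Claim_equal_longest_digit_run : Prop := ∀ (n : Int), Dom_longest_digit_run n → Pre_longest_digit_run n → Spec_longest_digit_run n (longest_digit_run n)

-- ===== LEMMAS AND PROOFS =====

-- the run-grouping of a list, carried as (key, run length) pairs
def pvGo' {α : Type} [DecidableEq α] (p : α) (r : Int) : List α → List (α × Int)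
  | [] => [(p, r)]
  | c :: t => if c = p then pvGo' p (r + 1) t else (p, r) :: pvGo' c 1 t

def pvGroups {α : Type} [DecidableEq α] : List α → List (α × Int)
  | [] => []
  | c :: t => pvGo' c 1 t

-- least-significant-first decimal digit list
def pvLsbN (m : Nat) : List Nat :=
  if m = 0 then [] else m % 10 :: pvLsbN (m / 10)
termination_by m
decreasing_by omega

def pvDig (m : Nat) : List Nat := m % 10 :: pvLsbN (m / 10)   -- full digit list, LSB first (0 ↦ [0])

def pvCast (l : List Nat) : List Int := l.map (fun k : Nat => (k : Int))

theorem pvCast_cons (a : Nat) (l : List Nat) : pvCast (a :: l) = (a : Int) :: pvCast l := rfl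

-- A's loop body as a step on (count, re, max_re)
def pvStep (st : Int × Int × Int) (d : Int) : Int × Int × Int :=
  let re' := if st.1 = d then st.2.1 + 1 else 1
  let count' := if st.1 = d then st.1 else d
  let mx' := if re' > st.2.2 then re' else st.2.2
  (count', re', mx')

theorem pvLoop_eq (m : Nat) : ∀ c r x : Int,
    pvLoop (m : Int) c r x =
      (List.foldl pvStep (c, r, x) (pvCast (pvLsbN m))).2.2 := by
  induction m using Nat.strong_induction_on with
  | _ m ih =>
    intro c r x
    by_cases hm : m = 0
    · subst hm; rw [pvLoop, pvLsbN]; simp [pvCast]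
    · rw [pvLoop, pvLsbN]
      have hne : (m : Int) ≠ 0 := by omega
      have hnlt : ¬ (m : Int) < 0 := by omega
      rw [dif_neg hne, dif_neg hnlt]
      have hmod : PySem.Int.mod ((m : Int)) 10 = ((m % 10 : Nat) : Int) := by
        exact_mod_cast PySem.Int.mod_natCast m 10
      have hdiv : PySem.Int.floordiv ((m : Int)) 10 = ((m / 10 : Nat) : Int) := by
        exact_mod_cast PySem.Int.floordiv_natCast m 10
      rw [hmod, hdiv, ih (m / 10) (by omega)]
      rw [if_neg hm, pvCast_cons, List.foldl_cons]
      rfl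

theorem pvGo'_head {α : Type} [DecidableEq α] :
    ∀ (t : List α) (p : α) (r : Int), ∃ k gs, pvGo' p r t = (p, k) :: gs ∧ r ≤ k := by
  intro t
  induction t with
  | nil => intro p r; exact ⟨r, [], rfl, le_refl r⟩
  | cons c t ih =>
    intro p r
    by_cases h : c = p
    · obtain ⟨k, gs, he, hk⟩ := ih p (r + 1)
      exact ⟨k, gs, by rw [pvGo', if_pos h, he], by omega⟩
    · exact ⟨r, pvGo' c 1 t, by rw [pvGo', if_neg h], le_refl r⟩

theorem pvFoldStep_max : ∀ (t : List Int) (c r x : Int), 1 ≤ r → r ≤ x →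
    (List.foldl pvStep (c, r, x) t).2.2 =
      List.foldl max x ((pvGo' c r t).map Prod.snd) := by
  intro t
  induction t with
  | nil => intro c r x h1 h2; simp [pvGo']; omega
  | cons d t ih =>
    intro c r x h1 h2
    by_cases h : d = c
    · have hcd : c = d := h.symm
      have hstep : pvStep (c, r, x) d = (c, r + 1, max x (r + 1)) := by
        have hx : (if r + 1 > x then r + 1 else x) = max x (r + 1) := by split <;> omega
        simp only [pvStep, if_pos hcd]
        rw [hx]
      rw [List.foldl_cons, hstep, ih c (r + 1) (max x (r + 1)) (by omega) (by omega)]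
      rw [pvGo', if_pos h]
      obtain ⟨k, gs, he, hk⟩ := pvGo'_head t c (r + 1)
      rw [he]
      simp only [List.map_cons, List.foldl_cons]
      have : max (max x (r + 1)) k = max x k := by omega
      rw [this]
    · have hcd : ¬ c = d := fun hh => h hh.symm
      have hstep : pvStep (c, r, x) d = (d, 1, x) := by
        have hx : (if (1 : Int) > x then 1 else x) = x := by split <;> omega
        simp only [pvStep, if_neg hcd]
        rw [hx]
      rw [List.foldl_cons, hstep, ih d 1 x (by omega) (by omega)]
      rw [pvGo', if_neg h]
      simp only [List.map_cons, List.foldl_cons]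
      have : max x r = x := by omega
      rw [this]

-- digits: Nat.toDigits via pvDig
theorem pvToDigitsCore (fuel : Nat) : ∀ (m : Nat) (ds : List Char), m < fuel →
    Nat.toDigitsCore 10 fuel m ds = ((pvDig m).reverse.map Nat.digitChar) ++ ds := by
  induction fuel with
  | zero => intro m ds h; omega
  | succ fuel ih =>
    intro m ds h
    rw [Nat.toDigitsCore]
    by_cases hq : m / 10 = 0
    · simp only [hq]
      rw [pvDig, hq, pvLsbN]
      simp
    · simp only [hq]
      rw [ih (m / 10) _ (by omega)]
      rw [pvDig, pvDig]
      conv_rhs => rw [pvLsbN]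
      simp only [hq]
      simp [List.map_append]

theorem pvToChars (m : Nat) :
    PySem.Int.toChars (m : Int) = (pvDig m).reverse.map Nat.digitChar := by
  rw [PySem.Int.toChars]
  have : ¬ (m : Int) < 0 := by omega
  rw [if_neg this]
  simp only [Int.toNat_natCast]
  rw [Nat.toDigits, pvToDigitsCore (m + 1) m [] (by omega)]
  simp

-- grouping commutes with an injective relabelling
theorem pvGo'_map {α β : Type} [DecidableEq α] [DecidableEq β] (f : α → β) :
    ∀ (l : List α) (p : α) (r : Int),
      (∀ a ∈ p :: l, ∀ b ∈ p :: l, f a = f b → a = b) →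
      pvGo' (f p) r (l.map f) = (pvGo' p r l).map (fun g => (f g.1, g.2)) := by
  intro l
  induction l with
  | nil => intro p r _; simp [pvGo']
  | cons c t ih =>
    intro p r hinj
    by_cases h : c = p
    · have hf : f c = f p := congrArg f h
      rw [List.map_cons, pvGo', if_pos hf, pvGo', if_pos h]
      have hsub : ∀ y, y ∈ p :: t → y ∈ p :: c :: t := by
        intro y hy; simp only [List.mem_cons] at hy ⊢; tauto
      exact ih p (r + 1) (fun a ha b hb => hinj a (hsub a ha) b (hsub b hb))
    · have hf : ¬ f c = f p := fun he => h (hinj c (by simp) p (by simp) he)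
      rw [List.map_cons, pvGo', if_neg hf, pvGo', if_neg h, List.map_cons]
      have hsub : ∀ y, y ∈ c :: t → y ∈ p :: c :: t := by
        intro y hy; simp only [List.mem_cons] at hy ⊢; tauto
      rw [ih c 1 (fun a ha b hb => hinj a (hsub a ha) b (hsub b hb))]

theorem pvGroups_map {α β : Type} [DecidableEq α] [DecidableEq β] (f : α → β) (l : List α)
    (hinj : ∀ a ∈ l, ∀ b ∈ l, f a = f b → a = b) :
    pvGroups (l.map f) = (pvGroups l).map (fun g => (f g.1, g.2)) := by
  cases l with
  | nil => rfl
  | cons c t => exact pvGo'_map f t c 1 hinj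

-- grouping of a reversed list
def pvMerge {α : Type} [DecidableEq α] (c : α) (r : Int) : List (α × Int) → List (α × Int)
  | [] => [(c, r)]
  | (q, k) :: gs => if q = c then (c, r + k) :: gs else (c, r) :: (q, k) :: gs

def pvModLast {α : Type} [DecidableEq α] (a : α) : List (α × Int) → List (α × Int)
  | [] => [(a, 1)]
  | [(q, k)] => if a = q then [(q, k + 1)] else [(q, k), (a, 1)]
  | g :: g2 :: gs => g :: pvModLast a (g2 :: gs)

theorem pvMerge_merge {α : Type} [DecidableEq α] (c : α) (r : Int) (gs : List (α × Int)) :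
    pvMerge c r (pvMerge c 1 gs) = pvMerge c (r + 1) gs := by
  cases gs with
  | nil => simp [pvMerge]
  | cons g gs' =>
    obtain ⟨q, k⟩ := g
    by_cases h : q = c
    · subst h; simp [pvMerge]; omega
    · simp [pvMerge, h]

theorem pvGo'_merge {α : Type} [DecidableEq α] :
    ∀ (t : List α) (c : α) (r : Int), pvGo' c r t = pvMerge c r (pvGroups t) := by
  intro t
  induction t with
  | nil => intro c r; rfl
  | cons d t ih =>
    intro c r
    by_cases h : d = c
    · rw [pvGo', if_pos h]
      show pvGo' c (r + 1) t = pvMerge c r (pvGo' d 1 t)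
      rw [ih c (r + 1), ih d 1, h, pvMerge_merge]
    · rw [pvGo', if_neg h]
      show (c, r) :: pvGo' d 1 t = pvMerge c r (pvGo' d 1 t)
      obtain ⟨k, gs, he, _⟩ := pvGo'_head t d 1
      rw [he, pvMerge, if_neg h]

theorem pvModLast_append {α : Type} [DecidableEq α] (a : α) :
    ∀ (xs : List (α × Int)) (g : α × Int), pvModLast a (xs ++ [g]) = xs ++ pvModLast a [g] := by
  intro xs
  induction xs with
  | nil => intro g; simp
  | cons y ys ih =>
    intro g
    cases ys with
    | nil => obtain ⟨q, k⟩ := g; rfl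
    | cons z zs =>
      have : (y :: z :: zs) ++ [g] = y :: ((z :: zs) ++ [g]) := rfl
      rw [this]
      show y :: pvModLast a ((z :: zs) ++ [g]) = _
      rw [ih g]
      rfl

theorem pvGo'_snoc {α : Type} [DecidableEq α] :
    ∀ (t : List α) (p : α) (r : Int) (a : α),
      pvGo' p r (t ++ [a]) = pvModLast a (pvGo' p r t) := by
  intro t
  induction t with
  | nil =>
    intro p r a
    by_cases h : a = p
    · subst h; simp [pvGo', pvModLast]
    · have h' : ¬ a = p := h
      simp [pvGo', pvModLast, h']
  | cons c t ih =>
    intro p r a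
    by_cases h : c = p
    · subst h; simp only [List.cons_append, pvGo']; exact ih c (r + 1) a
    · simp only [List.cons_append, pvGo', if_neg h]
      rw [ih c 1 a]
      obtain ⟨k, gs, he, _⟩ := pvGo'_head t c 1
      rw [he]
      rfl

theorem pvModLast_reverse {α : Type} [DecidableEq α] (a : α) (gs : List (α × Int)) :
    pvModLast a gs.reverse = (pvMerge a 1 gs).reverse := by
  cases gs with
  | nil => rfl
  | cons g gs' =>
    obtain ⟨q, k⟩ := g
    rw [List.reverse_cons, pvModLast_append]
    by_cases h : a = q
    · subst h
      simp [pvModLast, pvMerge]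
      omega
    · have h' : ¬ q = a := fun he => h he.symm
      simp [pvModLast, pvMerge, h, h']

theorem pvGroups_reverse {α : Type} [DecidableEq α] :
    ∀ (l : List α), pvGroups l.reverse = (pvGroups l).reverse := by
  intro l
  induction l with
  | nil => rfl
  | cons c t ih =>
    rw [List.reverse_cons]
    cases ht : t.reverse with
    | nil =>
      have : t = [] := by simpa using congrArg List.reverse ht
      subst this; rfl
    | cons d u =>
      have h1 : pvGroups (d :: (u ++ [c])) = pvGo' d 1 (u ++ [c]) := rfl
      have h2 : pvGo' d 1 u = pvGroups (d :: u) := rfl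
      have h3 : pvGroups (c :: t) = pvGo' c 1 t := rfl
      rw [List.cons_append, h1, pvGo'_snoc, h2, ← ht, ih, pvModLast_reverse, h3,
        pvGo'_merge t c 1]

theorem pvGo'_fst_mem {α : Type} [DecidableEq α] :
    ∀ (t : List α) (p : α) (r : Int), ∀ g ∈ pvGo' p r t, g.1 ∈ p :: t := by
  intro t
  induction t with
  | nil => intro p r g hg; simp [pvGo'] at hg; subst hg; simp
  | cons c t ih =>
    intro p r g hg
    by_cases h : c = p
    · subst h; rw [pvGo', if_pos rfl] at hg
      have := ih c (r + 1) g hg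
      simp only [List.mem_cons] at this ⊢; tauto
    · rw [pvGo', if_neg h] at hg
      rcases List.mem_cons.mp hg with h1 | h1
      · subst h1; simp
      · have := ih c 1 g h1
        simp only [List.mem_cons] at this ⊢; tauto

-- max over a list: fold identities
theorem pvFoldlMax_out : ∀ (l : List Int) (a b : Int),
    List.foldl max (max a b) l = max (List.foldl max a l) b := by
  intro l
  induction l with
  | nil => intro a b; rfl
  | cons h t ih =>
    intro a b
    simp only [List.foldl_cons]
    have : max (max a b) h = max (max a h) b := by omega
    rw [this, ih]

theorem pvFoldlMax_reverse : ∀ (l : List Int) (a : Int),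
    List.foldl max a l.reverse = List.foldl max a l := by
  intro l
  induction l with
  | nil => intro a; rfl
  | cons h t ih =>
    intro a
    rw [List.reverse_cons, List.foldl_append]
    simp only [List.foldl_cons, List.foldl_nil]
    rw [ih, ← pvFoldlMax_out]

theorem pvFoldlMax_base : ∀ (l : List Int) (a : Int), a ≤ List.foldl max a l := by
  intro l
  induction l with
  | nil => intro a; simp
  | cons h t ih => intro a; simp only [List.foldl_cons]; exact le_trans (le_max_left a h) (ih (max a h))

theorem pvFoldlMax_le : ∀ (l : List Int) (a x : Int), x ∈ l → x ≤ List.foldl max a l := by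
  intro l
  induction l with
  | nil => intro a x hx; simp at hx
  | cons h t ih =>
    intro a x hx
    rcases List.mem_cons.mp hx with h1 | h1
    · subst h1; simp only [List.foldl_cons]
      exact le_trans (le_max_right a x) (pvFoldlMax_base t (max a x))
    · exact ih (max a h) x h1

theorem pvFoldlMax_mem : ∀ (l : List Int) (a : Int),
    List.foldl max a l = a ∨ List.foldl max a l ∈ l := by
  intro l
  induction l with
  | nil => intro a; left; rfl
  | cons h t ih =>
    intro a
    rcases ih (max a h) with h1 | h1
    · simp only [List.foldl_cons, h1]
      by_cases hh : a ≤ h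
      · have hm : max a h = h := by omega
        right; rw [hm]; simp
      · have hm : max a h = a := by omega
        left; exact hm
    · right; right; exact h1

-- substring check ↔ IsInfix
theorem pvSub_iff (pat : List Char) : ∀ (s : List Char), pvSub pat s = true ↔ pat <:+: s := by
  intro s
  induction s with
  | nil =>
    simp [pvSub, List.isPrefixOf_iff_prefix]
  | cons c t ih =>
    rw [pvSub]
    simp only [Bool.or_eq_true, List.isPrefixOf_iff_prefix, ih, List.infix_cons_iff]

-- Lemma I: every recorded group corresponds to a genuine run (an infix of equal elements)
theorem pvGo'_infix {α : Type} [DecidableEq α] :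
    ∀ (t : List α) (p : α) (r : Nat), 1 ≤ r →
      ∀ g ∈ pvGo' p ((r : Nat) : Int) t,
        ∃ k : Nat, g.2 = (k : Int) ∧ List.replicate k g.1 <:+: (List.replicate r p ++ t) := by
  intro t
  induction t with
  | nil =>
    intro p r hr g hg
    simp [pvGo'] at hg; subst hg
    exact ⟨r, rfl, by simp⟩
  | cons c t ih =>
    intro p r hr g hg
    by_cases h : c = p
    · subst h
      rw [pvGo', if_pos rfl] at hg
      have hcast : ((r : Nat) : Int) + 1 = (((r + 1 : Nat)) : Int) := by push_cast; ring
      rw [hcast] at hg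
      obtain ⟨k, hk1, hk2⟩ := ih c (r + 1) (by omega) g hg
      refine ⟨k, hk1, ?_⟩
      have : List.replicate (r + 1) c ++ t = List.replicate r c ++ (c :: t) := by
        rw [List.replicate_succ']; simp
      rwa [this] at hk2
    · rw [pvGo', if_neg h] at hg
      rcases List.mem_cons.mp hg with h1 | h1
      · subst h1
        exact ⟨r, rfl, (List.prefix_append _ _).isInfix⟩
      · have h1' : g ∈ pvGo' c ((1 : Nat) : Int) t := by simpa using h1
        obtain ⟨k, hk1, hk2⟩ := ih c 1 (le_refl 1) g h1'
        refine ⟨k, hk1, ?_⟩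
        have hsub : List.replicate 1 c ++ t = c :: t := by simp
        rw [hsub] at hk2
        exact hk2.trans (List.suffix_append _ _).isInfix

-- Lemma IIa: a replicate-prefix is absorbed into the head group
theorem pvGo'_prefix_bound {α : Type} [DecidableEq α] :
    ∀ (t : List α) (p : α) (r k : Nat), 1 ≤ r →
      List.replicate k p <+: (p :: t) →
      ∃ k₀ gs, pvGo' p ((r : Nat) : Int) t = (p, k₀) :: gs ∧ ((r + k : Nat) : Int) ≤ k₀ + 1 := by
  intro t
  induction t with
  | nil =>
    intro p r k hr hpre
    have hk : k ≤ 1 := by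
      have := hpre.length_le
      simpa using this
    exact ⟨(r : Int), [], rfl, by push_cast; omega⟩
  | cons d t ih =>
    intro p r k hr hpre
    by_cases hk : k ≤ 1
    · obtain ⟨k₀, gs, he, hle⟩ := pvGo'_head (d :: t) p ((r : Nat) : Int)
      exact ⟨k₀, gs, he, by push_cast; omega⟩
    · -- k ≥ 2
      have hk2 : 2 ≤ k := by omega
      have hrep : List.replicate k p = p :: List.replicate (k - 1) p := by
        cases k with
        | zero => omega
        | succ k' => simp [List.replicate_succ]
      rw [hrep] at hpre
      have hpre' : List.replicate (k - 1) p <+: (d :: t) := by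
        obtain ⟨s, hs⟩ := hpre
        exact ⟨s, by simpa using hs⟩
      have hd : d = p := by
        obtain ⟨s, hs⟩ := hpre'
        cases hkk : k - 1 with
        | zero => omega
        | succ k' =>
          rw [hkk, List.replicate_succ, List.cons_append] at hs
          exact (List.cons.inj hs).1.symm
      subst hd
      rw [pvGo', if_pos rfl]
      have hcast : ((r : Nat) : Int) + 1 = (((r + 1 : Nat)) : Int) := by push_cast; ring
      rw [hcast]
      obtain ⟨k₀, gs, he, hle⟩ := ih d (r + 1) (k - 1) (by omega) hpre'
      exact ⟨k₀, gs, he, by push_cast at hle ⊢; omega⟩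

-- Lemma II: every run of equal elements is bounded by some recorded group length
theorem pvGo'_of_infix {α : Type} [DecidableEq α] :
    ∀ (t : List α) (p c : α) (r k : Nat), 1 ≤ r → 1 ≤ k →
      List.replicate k c <:+: (p :: t) →
      ∃ g ∈ pvGo' p ((r : Nat) : Int) t, ((k : Nat) : Int) ≤ g.2 := by
  intro t
  induction t with
  | nil =>
    intro p c r k hr hk hinf
    have hk1 : k = 1 := by
      have := hinf.length_le
      simp at this; omega
    refine ⟨(p, ((r : Nat) : Int)), by simp [pvGo'], ?_⟩
    simp; omega
  | cons d t ih =>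
    intro p c r k hr hk hinf
    rcases List.infix_cons_iff.mp hinf with hpre | hinf'
    · -- replicate k c is a prefix of p :: d :: t, so c = p
      have hc : c = p := by
        have hrep : List.replicate k c = c :: List.replicate (k - 1) c := by
          cases k with
          | zero => omega
          | succ k' => simp [List.replicate_succ]
        rw [hrep] at hpre
        obtain ⟨s, hs⟩ := hpre
        exact Option.some.inj (by simpa using congrArg (fun l => l.head?) hs)
      subst hc
      obtain ⟨k₀, gs, he, hle⟩ := pvGo'_prefix_bound (d :: t) c r k hr hpre
      refine ⟨(c, k₀), by rw [he]; simp, ?_⟩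
      push_cast at hle ⊢; omega
    · -- replicate k c is an infix of d :: t
      by_cases hd : d = p
      · subst hd
        obtain ⟨g, hg, hle⟩ := ih d c (r + 1) k (by omega) hk hinf'
        rw [pvGo', if_pos rfl]
        have hcast : ((r : Nat) : Int) + 1 = (((r + 1 : Nat)) : Int) := by push_cast; ring
        rw [hcast]
        exact ⟨g, hg, hle⟩
      · obtain ⟨g, hg, hle⟩ := ih d c 1 k (le_refl 1) hk hinf'
        rw [pvGo', if_neg hd]
        refine ⟨g, ?_, hle⟩
        simp only [List.mem_cons]
        right; simpa using hg

-- the maximum group length of a char list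
def pvMC (l : List Char) : Int := List.foldl max 1 ((pvGroups l).map Prod.snd)

theorem pvMC_pos (l : List Char) : 1 ≤ pvMC l := pvFoldlMax_base _ 1

theorem pvMC_attained (c : Char) (t : List Char) :
    ∃ g ∈ pvGroups (c :: t), g.2 = pvMC (c :: t) := by
  obtain ⟨k₀, gs, he, hk₀⟩ := pvGo'_head t c 1
  have hgr : pvGroups (c :: t) = pvGo' c 1 t := rfl
  rcases pvFoldlMax_mem ((pvGroups (c :: t)).map Prod.snd) 1 with h1 | h1
  · -- max = 1: the head group must have length exactly 1
    have hmem : k₀ ∈ (pvGroups (c :: t)).map Prod.snd := by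
      rw [hgr, he]; simp
    have hle := pvFoldlMax_le _ 1 k₀ hmem
    have : k₀ = 1 := by unfold pvMC at *; omega
    exact ⟨(c, k₀), by rw [hgr, he]; simp, by unfold pvMC; omega⟩
  · obtain ⟨g, hg, hge⟩ := List.mem_map.mp h1
    exact ⟨g, hg, hge⟩

theorem pvMC_ge (l : List Char) (g : Char × Int) (hg : g ∈ pvGroups l) : g.2 ≤ pvMC l :=
  pvFoldlMax_le _ 1 g.2 (List.mem_map.mpr ⟨g, hg, rfl⟩)

-- digits are < 10
theorem pvDig_lt' (m : Nat) : ∀ x ∈ pvDig m, x < 10 := by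
  rw [pvDig]
  intro x hx
  rcases List.mem_cons.mp hx with h | h
  · omega
  · clear hx
    generalize m / 10 = k at h
    induction k using Nat.strong_induction_on with
    | _ k ih =>
      rw [pvLsbN] at h
      by_cases hk : k = 0
      · simp [hk] at h
      · rw [if_neg hk] at h
        rcases List.mem_cons.mp h with h1 | h1
        · omega
        · exact ih (k / 10) (by omega) h1

theorem pvDigitChar_inj : ∀ a < 10, ∀ b < 10, Nat.digitChar a = Nat.digitChar b → a = b := by
  intro a ha b hb
  interval_cases a <;> interval_cases b <;> decide

-- every char of str(m) is a digit char
theorem pvCharsDigits (m : Nat) :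
    ∀ ch ∈ PySem.Int.toChars (m : Int), ∃ d : Nat, d < 10 ∧ ch = Nat.digitChar d := by
  intro ch hch
  rw [pvToChars] at hch
  obtain ⟨d, hd, he⟩ := List.mem_map.mp hch
  exact ⟨d, pvDig_lt' m d (List.mem_reverse.mp hd), he.symm⟩

-- pvBCond unfolded
theorem pvBCond_iff (s : List Char) (k : Nat) :
    pvBCond s k = true ↔ ∃ d : Nat, d < 10 ∧ List.replicate k (Nat.digitChar d) <:+: s := by
  unfold pvBCond
  rw [List.any_eq_true]
  constructor
  · rintro ⟨d, hd, hsub⟩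
    have hd' := (PySem.List.mem_pyRange_one).mp hd
    refine ⟨d.toNat, by omega, ?_⟩
    exact (pvSub_iff _ s).mp hsub
  · rintro ⟨d, hd, hinf⟩
    refine ⟨(d : Int), (PySem.List.mem_pyRange_one).mpr (by omega), ?_⟩
    have : ((d : Int)).toNat = d := by omega
    rw [this]
    exact (pvSub_iff _ s).mpr hinf

-- the descending search loop returns the largest k with pvBCond
theorem pvBLoop_eq (s : List Char) (kstar : Nat) (hstar : pvBCond s kstar = true)
    (hmax : ∀ j : Nat, kstar < j → pvBCond s j = false) :
    ∀ K : Nat, kstar ≤ K → pvBLoop s K = (kstar : Int) := by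
  intro K
  induction K with
  | zero => intro h; have : kstar = 0 := by omega
            subst this; rfl
  | succ K ih =>
    intro h
    by_cases hK : kstar = K + 1
    · subst hK
      rw [pvBLoop, if_pos hstar]
    · have h1 : kstar ≤ K := by omega
      rw [pvBLoop, if_neg (by rw [hmax (K + 1) (by omega)]; simp)]
      exact ih h1

-- A's value equals the max group length of the LSB-first digit list
theorem pvA_char (m : Nat) :
    longest_digit_run (m : Int) = List.foldl max 1 ((pvGroups (pvDig m)).map Prod.snd) := by
  rw [longest_digit_run]
  have hmod : PySem.Int.mod ((m : Int)) 10 = ((m % 10 : Nat) : Int) := by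
    exact_mod_cast PySem.Int.mod_natCast m 10
  have hdiv : PySem.Int.floordiv ((m : Int)) 10 = ((m / 10 : Nat) : Int) := by
    exact_mod_cast PySem.Int.floordiv_natCast m 10
  rw [hmod, hdiv, pvLoop_eq (m / 10) ((m % 10 : Nat) : Int) 1 1]
  rw [pvFoldStep_max _ _ _ _ (by omega) (by omega)]
  have hinj : ∀ a ∈ (m % 10) :: pvLsbN (m / 10), ∀ b ∈ (m % 10) :: pvLsbN (m / 10),
      ((fun k : Nat => (k : Int)) a) = ((fun k : Nat => (k : Int)) b) → a = b := by
    intro a _ b _ h; simpa using h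
  have hcast : pvCast (pvLsbN (m / 10)) = (pvLsbN (m / 10)).map (fun k : Nat => (k : Int)) := rfl
  rw [hcast, pvGo'_map (fun k : Nat => (k : Int)) (pvLsbN (m / 10)) (m % 10) 1 hinj]
  have hgr : pvGroups (pvDig m) = pvGo' (m % 10) 1 (pvLsbN (m / 10)) := rfl
  rw [hgr]
  simp [List.map_map, Function.comp_def]

-- A's value equals the max group length of the char list str(m)
theorem pvA_MC (m : Nat) :
    longest_digit_run (m : Int) = pvMC (PySem.Int.toChars (m : Int)) := by
  rw [pvA_char m]
  unfold pvMC
  rw [pvToChars m]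
  have hinj : ∀ a ∈ (pvDig m).reverse, ∀ b ∈ (pvDig m).reverse,
      Nat.digitChar a = Nat.digitChar b → a = b := by
    intro a ha b hb
    exact pvDigitChar_inj a (pvDig_lt' m a (List.mem_reverse.mp ha))
      b (pvDig_lt' m b (List.mem_reverse.mp hb))
  rw [pvGroups_map Nat.digitChar _ hinj, pvGroups_reverse]
  have : (((pvGroups (pvDig m)).reverse.map fun g => (Nat.digitChar g.1, g.2)).map Prod.snd)
      = ((pvGroups (pvDig m)).map Prod.snd).reverse := by
    simp [List.map_map, Function.comp_def, List.map_reverse]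
  rw [this, pvFoldlMax_reverse]

-- B's value equals the max group length of the char list str(m)
theorem pvB_MC (m : Nat) :
    longest_digit_run_alt (m : Int) = pvMC (PySem.Int.toChars (m : Int)) := by
  obtain ⟨c, t, hL⟩ : ∃ c t, PySem.Int.toChars (m : Int) = c :: t := by
    rw [pvToChars m]
    cases h : (pvDig m).reverse with
    | nil => exact absurd h (by simp [pvDig])
    | cons c' t' => exact ⟨Nat.digitChar c', t'.map Nat.digitChar, by simp [h]⟩
  have hdigits := pvCharsDigits m
  rw [hL] at hdigits
  show pvBLoop (PySem.Int.toChars (m : Int)) (PySem.Int.toChars (m : Int)).length = _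
  rw [hL]
  have hpos : 1 ≤ pvMC (c :: t) := pvMC_pos _
  set kstar : Nat := (pvMC (c :: t)).toNat with hks
  have hksv : ((kstar : Nat) : Int) = pvMC (c :: t) := by omega
  obtain ⟨g, hg, hgMC⟩ := pvMC_attained c t
  have hg' : g ∈ pvGo' c ((1 : Nat) : Int) t := by simpa [pvGroups] using hg
  obtain ⟨k, hk1, hk2⟩ := pvGo'_infix t c 1 (le_refl 1) g hg'
  have hkk : k = kstar := by
    have h2 : (k : Int) = pvMC (c :: t) := by rw [← hk1, hgMC]
    omega
  have hinfL : List.replicate kstar g.1 <:+: (c :: t) := by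
    rw [← hkk]; simpa using hk2
  have hg1L : g.1 ∈ c :: t := pvGo'_fst_mem t c _ g (by simpa using hg')
  obtain ⟨d, hd, hde⟩ := hdigits g.1 hg1L
  have hcond : pvBCond (c :: t) kstar = true :=
    (pvBCond_iff _ _).mpr ⟨d, hd, by rw [← hde]; exact hinfL⟩
  have hmax : ∀ j : Nat, kstar < j → pvBCond (c :: t) j = false := by
    intro j hj
    by_contra hcontra
    have hj' : pvBCond (c :: t) j = true := by
      cases h : pvBCond (c :: t) j
      · exact absurd h hcontra
      · rfl
    obtain ⟨d', hd', hinf'⟩ := (pvBCond_iff _ _).mp hj'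
    obtain ⟨g', hg'', hle⟩ :=
      pvGo'_of_infix t c (Nat.digitChar d') 1 j (le_refl 1) (by omega) hinf'
    have := pvMC_ge (c :: t) g' (by simpa [pvGroups] using hg'')
    omega
  have hlen : kstar ≤ (c :: t).length := by
    have h := hinfL.length_le
    simp at h ⊢
    omega
  rw [pvBLoop_eq (c :: t) kstar hcond hmax _ hlen, hksv]

-- ===== VERDICT (by name: the statement is the Claim_ definition above) =====
theorem longest_digit_run_spec : Claim_equal_longest_digit_run := by
  intro n _ hpre
  unfold Spec_longest_digit_run
  have h0 : (0 : Int) ≤ n := hpre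
  obtain ⟨m, rfl⟩ : ∃ m : Nat, n = (m : Int) := ⟨n.toNat, by omega⟩
  rw [pvA_MC m, pvB_MC m]
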